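-- pv_equiv track=rewrite | github.com/junhyukM/python | programmers.py | solution
-- ===== SOURCE A (Python) =====
-- def solution(keyinput, board):
--     answer = [0,0]
--     left_right = board[0]
--     up_down = board[1]
--
--     for i in keyinput:
--         if i == 'left':
--             if answer[0] > -1 * (left_right // 2):
--                 answer[0] -= 1
--         elif i == 'right':
--             if answer[0] < left_right // 2:
--                 answer[0] += 1
--         elif i == 'up':
--             if answer[1] < up_down // 2:
--                 answer[1] += 1
--         elif i == 'down':
--             if answer[1] > -1 * (up_down // 2):
--                 answer[1] -= 1
--
--     return answer
-- ===== SOURCE B (Python) =====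
-- def _walk(deltas, h):
--     # saturating 1-D accumulation of unit steps within [-h, h]
--     pos = 0
--     for d in deltas:
--         nxt = pos + d
--         if -h <= nxt <= h:
--             pos = nxt
--     return pos
--
-- def solution(keyinput, board):
--     xs = [-1 if k == 'left' else 1 for k in keyinput if k in ('left', 'right')]
--     ys = [-1 if k == 'down' else 1 for k in keyinput if k in ('up', 'down')]
--     return [_walk(xs, board[0] // 2), _walk(ys, board[1] // 2)]
-- ===== Notes on version B (the rewrite author's own statement) =====
-- stated objective: alternative
-- what changed: Decomposes the problem by axis: two staged passes first project the keystrokes to per-axis signed delta lists, then an independent 1-D saturating accumulation per axis replaces A's single loop over the combined (x,y) state with a four-way if/elif chain.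
import Mathlib
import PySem

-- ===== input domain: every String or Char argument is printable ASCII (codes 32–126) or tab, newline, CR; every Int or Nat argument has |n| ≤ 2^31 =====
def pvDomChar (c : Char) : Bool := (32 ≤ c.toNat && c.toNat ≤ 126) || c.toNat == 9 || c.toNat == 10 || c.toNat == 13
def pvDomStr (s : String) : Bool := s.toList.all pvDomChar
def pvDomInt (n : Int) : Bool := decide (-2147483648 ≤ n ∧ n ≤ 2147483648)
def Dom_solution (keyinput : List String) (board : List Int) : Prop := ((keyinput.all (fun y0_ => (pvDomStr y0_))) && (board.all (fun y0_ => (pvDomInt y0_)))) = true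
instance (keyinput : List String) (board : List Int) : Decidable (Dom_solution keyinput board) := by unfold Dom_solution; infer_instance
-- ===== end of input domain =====

-- B decomposes the task by axis: two staged passes project the keystrokes to per-axis
-- signed delta lists, then an independent 1-D saturating accumulation per axis replaces
-- A's single loop over the combined (x, y) state; objective: alternative.

-- ===== PORT A =====
def solutionStepA (left_right up_down : Int) (answer : Int × Int) (i : String) : Int × Int :=
  if i == "left" then
    (if answer.1 > -1 * (PySem.Int.floordiv left_right 2) then (answer.1 - 1, answer.2) else answer)
  else if i == "right" then
    (if answer.1 < PySem.Int.floordiv left_right 2 then (answer.1 + 1, answer.2) else answer)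
  else if i == "up" then
    (if answer.2 < PySem.Int.floordiv up_down 2 then (answer.1, answer.2 + 1) else answer)
  else if i == "down" then
    (if answer.2 > -1 * (PySem.Int.floordiv up_down 2) then (answer.1, answer.2 - 1) else answer)
  else answer

def solution (keyinput : List String) (board : List Int) : List Int :=
  let b0? := PySem.List.pyGet? board 0
  let b1? := PySem.List.pyGet? board 1
  if b0?.isSome && b1?.isSome then
    let answer := keyinput.foldl (solutionStepA (b0?.getD 0) (b1?.getD 0)) (0, 0)
    [answer.1, answer.2]
  else []  -- board[0] / board[1]: IndexError, excluded by Pre_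

-- ===== PORT B =====
def solutionWalk (deltas : List Int) (h : Int) : Int :=
  deltas.foldl (fun pos d => let nxt := pos + d; if -h ≤ nxt ∧ nxt ≤ h then nxt else pos) 0

def solutionXs (keyinput : List String) : List Int :=
  (keyinput.filter (fun k => k == "left" || k == "right")).map (fun k => if k == "left" then -1 else 1)

def solutionYs (keyinput : List String) : List Int :=
  (keyinput.filter (fun k => k == "up" || k == "down")).map (fun k => if k == "down" then -1 else 1)

def solution_alt (keyinput : List String) (board : List Int) : List Int :=
  let b0? := PySem.List.pyGet? board 0
  let b1? := PySem.List.pyGet? board 1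
  if b0?.isSome && b1?.isSome then
    [solutionWalk (solutionXs keyinput) (PySem.Int.floordiv (b0?.getD 0) 2),
     solutionWalk (solutionYs keyinput) (PySem.Int.floordiv (b1?.getD 0) 2)]
  else []  -- board[0] / board[1]: IndexError, excluded by Pre_

-- ===== PRECONDITION & SPEC =====
-- A indexes board[0] and board[1]: Pre_ excludes boards of length < 2, on which A raises IndexError.
def Pre_solution (keyinput : List String) (board : List Int) : Prop := 2 ≤ board.length
instance (keyinput : List String) (board : List Int) : Decidable (Pre_solution keyinput board) := by unfold Pre_solution; infer_instance
def pvWitness_solution : List String × List Int := (["left", "left", "up", "down"], [5, 4])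

def Spec_solution (keyinput : List String) (board : List Int) (out : List Int) : Prop := out = solution_alt keyinput board
instance (keyinput : List String) (board : List Int) (out : List Int) : Decidable (Spec_solution keyinput board out) := by unfold Spec_solution; infer_instance

-- ===== CLAIM =====
def Claim_equal_solution : Prop := ∀ (keyinput : List String) (board : List Int), Dom_solution keyinput board → Pre_solution keyinput board → Spec_solution keyinput board (solution keyinput board)

-- ===== LEMMAS AND PROOFS =====

-- reachable states of one axis: 0 before the first accepted move, afterwards within [-h, h] (only possible when 0 ≤ h)
def solutionInv (h x : Int) : Prop := x = 0 ∨ (0 ≤ h ∧ -h ≤ x ∧ x ≤ h)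

def solutionWalkFrom (h : Int) (x : Int) (deltas : List Int) : Int :=
  deltas.foldl (fun pos d => let nxt := pos + d; if -h ≤ nxt ∧ nxt ≤ h then nxt else pos) x

-- A's fold over the combined state equals the pair of per-axis saturating folds over the filtered delta lists
theorem solutionFold_pair (lr ud : Int) (ks : List String) :
    ∀ (x y : Int), solutionInv (PySem.Int.floordiv lr 2) x →
      solutionInv (PySem.Int.floordiv ud 2) y →
      ks.foldl (solutionStepA lr ud) (x, y)
        = (solutionWalkFrom (PySem.Int.floordiv lr 2) x (solutionXs ks),
           solutionWalkFrom (PySem.Int.floordiv ud 2) y (solutionYs ks)) := by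
  induction ks with
  | nil => intro x y _ _; rfl
  | cons i ks ih =>
      intro x y hx hy
      set hA := PySem.Int.floordiv lr 2 with hAdef
      set hB := PySem.Int.floordiv ud 2 with hBdef
      by_cases h1 : i = "left"
      · subst h1
        have hxs : solutionXs ("left" :: ks) = -1 :: solutionXs ks := rfl
        have hys : solutionYs ("left" :: ks) = solutionYs ks := rfl
        simp only [List.foldl_cons, solutionStepA, hxs, hys, solutionWalkFrom, beq_iff_eq,
          if_true]
        have hstep : (if x > -1 * hA then (x - 1, y) else (x, y))
            = ((if -hA ≤ x + -1 ∧ x + -1 ≤ hA then x + -1 else x), y) := by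
          unfold solutionInv at hx; split_ifs <;> simp_all <;> omega
        rw [hstep]
        have hx' : solutionInv hA (if -hA ≤ x + -1 ∧ x + -1 ≤ hA then x + -1 else x) := by
          unfold solutionInv at *; split_ifs with hc
          · right; omega
          · exact hx
        exact ih _ y hx' hy
      · by_cases h2 : i = "right"
        · subst h2
          have hxs : solutionXs ("right" :: ks) = 1 :: solutionXs ks := rfl
          have hys : solutionYs ("right" :: ks) = solutionYs ks := rfl
          simp only [List.foldl_cons, solutionStepA, hxs, hys, solutionWalkFrom, beq_iff_eq,
            if_true]
          have hstep : (if x < hA then (x + 1, y) else (x, y))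
              = ((if -hA ≤ x + 1 ∧ x + 1 ≤ hA then x + 1 else x), y) := by
            unfold solutionInv at hx; split_ifs <;> simp_all <;> omega
          rw [hstep]
          have hx' : solutionInv hA (if -hA ≤ x + 1 ∧ x + 1 ≤ hA then x + 1 else x) := by
            unfold solutionInv at *; split_ifs with hc
            · right; omega
            · exact hx
          exact ih _ y hx' hy
        · by_cases h3 : i = "up"
          · subst h3
            have hxs : solutionXs ("up" :: ks) = solutionXs ks := rfl
            have hys : solutionYs ("up" :: ks) = 1 :: solutionYs ks := rfl
            simp only [List.foldl_cons, solutionStepA, hxs, hys, solutionWalkFrom, beq_iff_eq,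
              if_true]
            have hstep : (if y < hB then (x, y + 1) else (x, y))
                = (x, (if -hB ≤ y + 1 ∧ y + 1 ≤ hB then y + 1 else y)) := by
              unfold solutionInv at hy; split_ifs <;> simp_all <;> omega
            rw [hstep]
            have hy' : solutionInv hB (if -hB ≤ y + 1 ∧ y + 1 ≤ hB then y + 1 else y) := by
              unfold solutionInv at *; split_ifs with hc
              · right; omega
              · exact hy
            exact ih x _ hx hy'
          · by_cases h4 : i = "down"
            · subst h4
              have hxs : solutionXs ("down" :: ks) = solutionXs ks := rfl
              have hys : solutionYs ("down" :: ks) = -1 :: solutionYs ks := rfl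
              simp only [List.foldl_cons, solutionStepA, hxs, hys, solutionWalkFrom, beq_iff_eq,
                if_true]
              have hstep : (if y > -1 * hB then (x, y - 1) else (x, y))
                  = (x, (if -hB ≤ y + -1 ∧ y + -1 ≤ hB then y + -1 else y)) := by
                unfold solutionInv at hy; split_ifs <;> simp_all <;> omega
              rw [hstep]
              have hy' : solutionInv hB (if -hB ≤ y + -1 ∧ y + -1 ≤ hB then y + -1 else y) := by
                unfold solutionInv at *; split_ifs with hc
                · right; omega
                · exact hy
              exact ih x _ hx hy'
            · have hxs : solutionXs (i :: ks) = solutionXs ks := by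
                simp [solutionXs, h1, h2]
              have hys : solutionYs (i :: ks) = solutionYs ks := by
                simp [solutionYs, h3, h4]
              simp only [List.foldl_cons, solutionStepA, hxs, hys]
              simp only [beq_iff_eq, h1, h2, h3, h4, if_false]
              exact ih x y hx hy

-- ===== VERDICT =====
theorem solution_spec : Claim_equal_solution := by
  intro keyinput board _ hpre
  have hlen : 2 ≤ board.length := hpre
  have hb0 : PySem.List.pyGet? board 0 = some board[0] := by
    exact_mod_cast PySem.List.pyGet?_ofNat (xs := board) (n := 0) (by omega)
  have hb1 : PySem.List.pyGet? board 1 = some board[1] := by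
    exact_mod_cast PySem.List.pyGet?_ofNat (xs := board) (n := 1) (by omega)
  have h := solutionFold_pair board[0] board[1] keyinput 0 0 (Or.inl rfl) (Or.inl rfl)
  show _ = solution_alt keyinput board
  simp only [solution, solution_alt, hb0, hb1, Option.isSome_some, Option.getD_some, Bool.and_self, if_true, h, solutionWalk, solutionWalkFrom]
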